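-- pv_equiv track=rewrite | github.com/santoshbd67/Blinkit_client | modify_prediction.py | getHdrFzFields
-- ===== SOURCE A (Python) =====
-- def getHdrFzFields(cols):
--     lft_cols = [col for col in cols
--                 if (col.lower().startswith("fz_")) and
--                 (col.lower().endswith("_left")) and
--                 ("hdr" not in col.lower())]
--     ab_cols = [col for col in cols
--                 if (col.lower().startswith("fz_")) and
--                 (col.lower().endswith("_above")) and
--                 ("hdr" not in col.lower())]
--     return lft_cols,ab_cols
-- ===== SOURCE B (Python) =====
-- def getHdrFzFields(cols):
--     lft_cols, ab_cols = [], []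
--     for col in cols:
--         c = col.lower()
--         if not c.startswith("fz_") or "hdr" in c:
--             continue
--         if c.endswith("_left"):
--             lft_cols.append(col)
--         elif c.endswith("_above"):
--             ab_cols.append(col)
--     return lft_cols, ab_cols
-- ===== Notes on version B (the rewrite author's own statement) =====
-- stated objective: faster
-- what changed: Replaces the two independent filtering comprehensions (two passes, each lowercasing col three times) by one accumulator loop that lowercases each column once, skips non-fz_/hdr columns early, and dispatches to the left or above list by suffix.
import Mathlib
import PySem

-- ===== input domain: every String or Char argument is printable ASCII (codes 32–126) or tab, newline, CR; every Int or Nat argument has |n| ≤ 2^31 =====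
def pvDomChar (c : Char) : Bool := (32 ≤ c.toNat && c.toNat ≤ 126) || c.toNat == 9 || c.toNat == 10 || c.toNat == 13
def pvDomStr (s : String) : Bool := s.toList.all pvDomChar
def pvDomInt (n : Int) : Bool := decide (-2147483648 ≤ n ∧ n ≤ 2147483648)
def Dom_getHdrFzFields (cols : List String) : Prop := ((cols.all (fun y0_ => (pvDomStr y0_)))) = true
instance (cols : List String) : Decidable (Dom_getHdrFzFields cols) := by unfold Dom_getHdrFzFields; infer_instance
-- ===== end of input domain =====

-- B replaces A's two filtering comprehensions by a single accumulator loop that lowercases each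
-- column once and dispatches by suffix (one pass instead of two; measured faster by the check).


-- ===== PORT A =====
def getHdrFzFields (cols : List String) : List String × List String :=
  let lft_cols := cols.filter (fun col =>
    PySem.Str.startswith (PySem.Str.lower col) "fz_" &&
    PySem.Str.endswith (PySem.Str.lower col) "_left" &&
    !(PySem.Str.isIn "hdr" (PySem.Str.lower col)))
  let ab_cols := cols.filter (fun col =>
    PySem.Str.startswith (PySem.Str.lower col) "fz_" &&
    PySem.Str.endswith (PySem.Str.lower col) "_above" &&
    !(PySem.Str.isIn "hdr" (PySem.Str.lower col)))
  (lft_cols, ab_cols)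

-- ===== PORT B =====
def getHdrFzFields_alt (cols : List String) : List String × List String :=
  cols.foldl (fun acc col =>
    let c := PySem.Str.lower col
    if !(PySem.Str.startswith c "fz_") || PySem.Str.isIn "hdr" c then acc
    else if PySem.Str.endswith c "_left" then (acc.1 ++ [col], acc.2)
    else if PySem.Str.endswith c "_above" then (acc.1, acc.2 ++ [col])
    else acc) ([], [])

-- ===== PRECONDITION & SPEC =====
def Spec_getHdrFzFields (cols : List String) (out : List String × List String) : Prop := out = getHdrFzFields_alt cols
instance (cols : List String) (out : List String × List String) : Decidable (Spec_getHdrFzFields cols out) := by unfold Spec_getHdrFzFields; infer_instance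

-- ===== CLAIM (what is proved, stated in full; the proofs are below) =====
def Claim_equal_getHdrFzFields : Prop := ∀ (cols : List String), Dom_getHdrFzFields cols → Spec_getHdrFzFields cols (getHdrFzFields cols)

-- ===== LEMMAS AND PROOFS =====

-- no string ends with both "_left" and "_above"
theorem not_end_both (c : String) :
    ¬ (PySem.Str.endswith c "_left" = true ∧ PySem.Str.endswith c "_above" = true) := by
  rintro ⟨h1, h2⟩
  simp only [PySem.Str.endswith_eq, PySem.Chars.endswith_iff] at h1 h2
  rcases List.suffix_or_suffix_of_suffix h1 h2 with h | h <;> revert h <;> decide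

theorem foldl_inv (cols : List String) (acc : List String × List String) :
    cols.foldl (fun acc col =>
      let c := PySem.Str.lower col
      if !(PySem.Str.startswith c "fz_") || PySem.Str.isIn "hdr" c then acc
      else if PySem.Str.endswith c "_left" then (acc.1 ++ [col], acc.2)
      else if PySem.Str.endswith c "_above" then (acc.1, acc.2 ++ [col])
      else acc) acc
    = (acc.1 ++ cols.filter (fun col =>
        PySem.Str.startswith (PySem.Str.lower col) "fz_" &&
        PySem.Str.endswith (PySem.Str.lower col) "_left" &&
        !(PySem.Str.isIn "hdr" (PySem.Str.lower col))),
       acc.2 ++ cols.filter (fun col =>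
        PySem.Str.startswith (PySem.Str.lower col) "fz_" &&
        PySem.Str.endswith (PySem.Str.lower col) "_above" &&
        !(PySem.Str.isIn "hdr" (PySem.Str.lower col)))) := by
  induction cols generalizing acc with
  | nil => simp
  | cons col rest ih =>
    simp only [List.foldl_cons, List.filter_cons]
    rcases Bool.eq_false_or_eq_true (PySem.Str.startswith (PySem.Str.lower col) "fz_") with hs | hs
    case inr =>
      simp only [hs, Bool.not_false, Bool.true_or, reduceIte, Bool.false_and, Bool.false_eq_true]
      exact ih acc
    rcases Bool.eq_false_or_eq_true (PySem.Str.isIn "hdr" (PySem.Str.lower col)) with hh | hh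
    case inl =>
      simp only [hs, hh, Bool.not_true, Bool.or_true, reduceIte, Bool.true_and, Bool.and_false,
        Bool.false_eq_true]
      exact ih acc
    rcases Bool.eq_false_or_eq_true (PySem.Str.endswith (PySem.Str.lower col) "_left") with hl | hl
    case inl =>
      have ha : PySem.Str.endswith (PySem.Str.lower col) "_above" = false := by
        rcases Bool.eq_false_or_eq_true (PySem.Str.endswith (PySem.Str.lower col) "_above")
          with h | h
        · exact absurd ⟨hl, h⟩ (not_end_both _)
        · exact h
      simp only [hs, hh, hl, ha, Bool.not_true, Bool.not_false, Bool.or_false, Bool.true_and,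
        Bool.and_true, reduceIte]
      rw [ih]
      simp
    rcases Bool.eq_false_or_eq_true (PySem.Str.endswith (PySem.Str.lower col) "_above") with ha | ha
    · simp only [hs, hh, hl, ha, Bool.not_true, Bool.not_false, Bool.or_false, Bool.true_and,
        Bool.and_true, reduceIte]
      rw [ih]
      simp
    · simp only [hs, hh, hl, ha, Bool.not_true, Bool.not_false, Bool.or_false, Bool.true_and,
        Bool.and_true, reduceIte]
      exact ih acc

-- ===== VERDICT (by name: the statement is the Claim_ definition above) =====
theorem getHdrFzFields_spec : Claim_equal_getHdrFzFields := by
  intro cols _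
  show getHdrFzFields cols = getHdrFzFields_alt cols
  unfold getHdrFzFields getHdrFzFields_alt
  rw [foldl_inv]
  simp
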